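-- pv_equiv track=rewrite | github.com/DTUSDC/ros | perception_pipeline/nodes/perception_demo.py | left_right_cluster
-- ===== SOURCE A (Python) =====
-- def left_right_cluster(coords, n):
--     one = n[0]
--     two = n[1]
--     left = []
--     right = []
--     for i in range(len(coords)):
--         if coords[i][0] == one:
--             left.append(coords[i][1])
--     for j in range(len(coords)):
--         if coords[j][0] == two:
--             right.append(coords[j][1])
--     return left, right
-- ===== SOURCE B (Python) =====
-- def left_right_cluster(coords, n):
--     # Group all y-values by their x key in one pass, then answer both
--     # queries by dictionary lookup. Order within each group is input order,
--     # so this matches the filtering loops exactly (including n[0] == n[1]).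
--     groups = {}
--     for x, y in coords:
--         groups.setdefault(x, []).append(y)
--     return groups.get(n[0], []), groups.get(n[1], [])
-- ===== Notes on version B (the rewrite author's own statement) =====
-- stated objective: alternative
-- what changed: Replaces A's two filtering scans keyed on n[0] and n[1] by a single grouping pass that builds a dict from key to list of values, then answers both queries by lookup.
import Mathlib
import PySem

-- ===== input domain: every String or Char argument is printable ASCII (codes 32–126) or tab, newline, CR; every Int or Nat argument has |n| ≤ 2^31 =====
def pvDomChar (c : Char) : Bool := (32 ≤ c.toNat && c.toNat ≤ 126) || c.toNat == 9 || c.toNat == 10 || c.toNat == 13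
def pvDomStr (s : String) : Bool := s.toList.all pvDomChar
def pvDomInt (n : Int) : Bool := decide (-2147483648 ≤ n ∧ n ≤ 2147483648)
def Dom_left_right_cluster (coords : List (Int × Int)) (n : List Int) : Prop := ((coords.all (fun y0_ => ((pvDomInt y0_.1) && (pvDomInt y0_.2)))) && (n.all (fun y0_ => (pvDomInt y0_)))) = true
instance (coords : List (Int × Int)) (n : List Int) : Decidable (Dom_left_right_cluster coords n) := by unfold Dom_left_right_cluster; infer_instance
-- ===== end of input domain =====

-- B replaces A's two filtering scans by one grouping pass into a dict keyed by x, then two lookups (alternative data structure, same cost).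

-- ===== PORT A =====
-- A: two separate index loops over coords, filling `left` on key n[0], then `right` on key n[1].
def left_right_cluster (coords : List (Int × Int)) (n : List Int) : List Int × List Int :=
  let one := (PySem.List.pyGet? n 0).getD 0   -- Pre_ guarantees the index exists
  let two := (PySem.List.pyGet? n 1).getD 0
  let left := coords.foldl (fun acc c => if c.1 = one then acc ++ [c.2] else acc) []
  let right := coords.foldl (fun acc c => if c.1 = two then acc ++ [c.2] else acc) []
  (left, right)

-- ===== PORT B =====
-- B: one grouping pass building a Dict from key to list of values, then two lookups.
def left_right_cluster_alt (coords : List (Int × Int)) (n : List Int) : List Int × List Int :=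
  let groups : PySem.Dict Int (List Int) :=
    coords.foldl (fun d c => d.insert c.1 (d.getD c.1 [] ++ [c.2])) PySem.Dict.empty
  (groups.getD ((PySem.List.pyGet? n 0).getD 0) [],
   groups.getD ((PySem.List.pyGet? n 1).getD 0) [])

-- ===== PRECONDITION & SPEC =====
-- A indexes n[0] and n[1]; both programs raise IndexError when n is shorter than 2.
def Pre_left_right_cluster (coords : List (Int × Int)) (n : List Int) : Prop := 2 ≤ n.length
instance (coords : List (Int × Int)) (n : List Int) : Decidable (Pre_left_right_cluster coords n) := by unfold Pre_left_right_cluster; infer_instance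
def pvWitness_left_right_cluster : (List (Int × Int)) × List Int := ([(1, 10), (2, 20), (1, 30)], [1, 2])

def Spec_left_right_cluster (coords : List (Int × Int)) (n : List Int) (out : List Int × List Int) : Prop := out = left_right_cluster_alt coords n
instance (coords : List (Int × Int)) (n : List Int) (out : List Int × List Int) : Decidable (Spec_left_right_cluster coords n out) := by unfold Spec_left_right_cluster; infer_instance

-- ===== CLAIM =====
def Claim_equal_left_right_cluster : Prop := ∀ (coords : List (Int × Int)) (n : List Int), Dom_left_right_cluster coords n → Pre_left_right_cluster coords n → Spec_left_right_cluster coords n (left_right_cluster coords n)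

-- ===== LEMMAS AND PROOFS =====

-- Looking up key k in the grouping dict yields exactly A's filtering fold for k.
theorem groups_getD (k : Int) (coords : List (Int × Int)) (d : PySem.Dict Int (List Int)) :
    (coords.foldl (fun d c => d.insert c.1 (d.getD c.1 [] ++ [c.2])) d).getD k []
    = coords.foldl (fun acc c => if c.1 = k then acc ++ [c.2] else acc) (d.getD k []) := by
  induction coords generalizing d with
  | nil => rfl
  | cons c cs ih =>
    simp only [List.foldl, ih, PySem.Dict.getD_insert]
    by_cases h : c.1 = k
    · subst h; simp
    · simp [h, Ne.symm h]

-- ===== VERDICT =====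
theorem left_right_cluster_spec : Claim_equal_left_right_cluster := by
  intro coords n _ _
  unfold Spec_left_right_cluster left_right_cluster left_right_cluster_alt
  simp only [groups_getD, PySem.Dict.getD_empty]
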